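-- pv_equiv track=rewrite | github.com/Grant-Huang/docs2md | src/docs2md/converters/pdf_converter.py | _text_to_md
-- ===== SOURCE A (Python) =====
-- def _text_to_md(text: str, page_num: int) -> str:
--     lines = text.splitlines()
--     cleaned: list[str] = []
--     for line in lines:
--         stripped = line.strip()
--         if stripped:
--             cleaned.append(stripped)
--         elif cleaned and cleaned[-1] != "":
--             cleaned.append("")
--     body = "\n".join(cleaned).strip()
--     return f"## 第 {page_num} 页\n\n{body}"
-- ===== SOURCE B (Python) =====
-- def _text_to_md(text: str, page_num: int) -> str:
--     paragraphs: list[list[str]] = []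
--     current: list[str] = []
--     for line in text.splitlines():
--         stripped = line.strip()
--         if stripped:
--             current.append(stripped)
--         elif current:
--             paragraphs.append(current)
--             current = []
--     if current:
--         paragraphs.append(current)
--     body = "\n\n".join("\n".join(p) for p in paragraphs)
--     return f"## 第 {page_num} 页\n\n{body}"
-- ===== Notes on version B (the rewrite author's own statement) =====
-- stated objective: alternative
-- what changed: A keeps one flat list with blank-line sentinels appended only after a non-blank entry and then strips the joined string; B groups the stripped lines into paragraphs (lists of non-blank lines) and joins the paragraphs with '\n\n', needing no sentinel bookkeeping and no final strip.
import Mathlib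
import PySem

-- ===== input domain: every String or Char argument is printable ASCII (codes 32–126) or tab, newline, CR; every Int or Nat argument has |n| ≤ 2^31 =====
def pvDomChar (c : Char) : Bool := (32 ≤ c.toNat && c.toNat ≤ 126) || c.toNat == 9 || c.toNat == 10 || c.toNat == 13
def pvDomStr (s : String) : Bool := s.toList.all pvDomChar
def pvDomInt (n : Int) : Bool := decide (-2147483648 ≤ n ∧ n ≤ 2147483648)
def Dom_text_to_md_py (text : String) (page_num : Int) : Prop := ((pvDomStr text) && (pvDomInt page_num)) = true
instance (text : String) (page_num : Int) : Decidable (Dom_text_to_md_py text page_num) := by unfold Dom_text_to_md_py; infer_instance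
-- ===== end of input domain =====

-- B replaces A's flat list with blank-line sentinels (plus a final strip) by grouping stripped
-- lines into paragraphs joined with "\n\n"; same return value, similar cost (objective: alternative).

-- ===== PORT A =====
-- one step of A's loop over the lines ('cleaned' accumulator)
def text_to_md_stepA (cleaned : List String) (line : String) : List String :=
  let stripped := PySem.Str.strip line
  if stripped ≠ "" then cleaned ++ [stripped]
  else if cleaned ≠ [] ∧ PySem.List.pyGet? cleaned (-1) ≠ some "" then cleaned ++ [""]
  else cleaned

def text_to_md_py (text : String) (page_num : Int) : String :=
  let lines := PySem.Str.splitlines text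
  let cleaned := lines.foldl text_to_md_stepA []
  let body := PySem.Str.strip (PySem.Str.join "\n" cleaned)
  "## 第 " ++ PySem.Int.toStr page_num ++ " 页\n\n" ++ body

-- ===== PORT B =====
-- one step of B's loop: state = (paragraphs so far, current paragraph)
def text_to_md_stepB (st : List (List String) × List String) (line : String) :
    List (List String) × List String :=
  let stripped := PySem.Str.strip line
  if stripped ≠ "" then (st.1, st.2 ++ [stripped])
  else if st.2 ≠ [] then (st.1 ++ [st.2], []) else st

def text_to_md_py_alt (text : String) (page_num : Int) : String :=
  let st := (PySem.Str.splitlines text).foldl text_to_md_stepB ([], [])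
  let paragraphs := if st.2 ≠ [] then st.1 ++ [st.2] else st.1
  let body := PySem.Str.join "\n\n" (paragraphs.map (fun p => PySem.Str.join "\n" p))
  "## 第 " ++ PySem.Int.toStr page_num ++ " 页\n\n" ++ body

-- ===== PRECONDITION & SPEC =====
def Spec_text_to_md_py (text : String) (page_num : Int) (out : String) : Prop := out = text_to_md_py_alt text page_num
instance (text : String) (page_num : Int) (out : String) : Decidable (Spec_text_to_md_py text page_num out) := by unfold Spec_text_to_md_py; infer_instance

-- ===== CLAIM (what is proved, stated in full; the proofs are below) =====
def Claim_equal_text_to_md_py : Prop := ∀ (text : String) (page_num : Int), Dom_text_to_md_py text page_num → Spec_text_to_md_py text page_num (text_to_md_py text page_num)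

-- ===== LEMMAS AND PROOFS =====

-- a string that is a non-empty fixed point of strip
def CleanS (s : String) : Prop := PySem.Chars.strip s.toList = s.toList ∧ s.toList ≠ []

-- A's flat 'cleaned' list as a function of B's paragraph grouping
def glueS : List (List String) → List String
  | [] => []
  | [p] => p
  | p :: q :: rest => p ++ "" :: glueS (q :: rest)

def glueC : List (List (List Char)) → List (List Char)
  | [] => []
  | [p] => p
  | p :: q :: rest => p ++ [] :: glueC (q :: rest)

def reprS (done : List (List String)) (cur : List String) : List String :=
  if cur ≠ [] then glueS (done ++ [cur])
  else if done = [] then [] else glueS done ++ [""]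

def GoodS (done : List (List String)) (cur : List String) : Prop :=
  (∀ p ∈ done, p ≠ [] ∧ ∀ s ∈ p, CleanS s) ∧ (∀ s ∈ cur, CleanS s)

lemma str_eq_empty_iff (s : String) : s = "" ↔ s.toList = [] := by
  constructor
  · rintro rfl; rfl
  · intro h; have := congrArg String.ofList h; simpa using this

lemma glueS_append_singleton (ps : List (List String)) (q : List String) :
    glueS (ps ++ [q]) = if ps = [] then q else glueS ps ++ "" :: q := by
  induction ps with
  | nil => simp [glueS]
  | cons x t ih =>
    cases t with
    | nil => simp [glueS]
    | cons y t' =>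
      have h : ((x :: y :: t') ++ [q]) = x :: ((y :: t') ++ [q]) := rfl
      rw [h, show ((y :: t') ++ [q]) = y :: (t' ++ [q]) from rfl]
      simp only [glueS, ← show ((y :: t') ++ [q]) = y :: (t' ++ [q]) from rfl, ih]
      simp [glueS]

lemma map_toList_glueS (ps : List (List String)) :
    (glueS ps).map String.toList = glueC (ps.map (fun p => p.map String.toList)) := by
  induction ps with
  | nil => simp [glueS, glueC]
  | cons x t ih =>
    cases t with
    | nil => simp [glueS, glueC]
    | cons y t' =>
      simp only [glueS, List.map_cons, glueC, List.map_append] at *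
      simp [ih]

lemma reprS_cur_append (done : List (List String)) (cur : List String) (s : String) :
    reprS done cur ++ [s] = reprS done (cur ++ [s]) := by
  unfold reprS
  by_cases hc : cur = []
  · subst hc
    by_cases hd : done = [] <;>
      simp [hd, glueS_append_singleton, glueS]
  · have hcs : cur ++ [s] ≠ [] := by simp
    simp only [ne_eq, hc, not_false_eq_true, if_pos, hcs,
      glueS_append_singleton]
    by_cases hd : done = [] <;> simp [hd]

lemma head?_lstrip_not_ws (cs : List Char) (c : Char)
    (h : (PySem.Chars.lstrip cs).head? = some c) : PySem.Chars.isspace c = false := by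
  have := List.head?_dropWhile_not PySem.Chars.isspace cs
  unfold PySem.Chars.lstrip at h
  rw [h] at this; simpa using this

lemma getLast?_rstrip_not_ws (cs : List Char) (c : Char)
    (h : (PySem.Chars.rstrip cs).getLast? = some c) : PySem.Chars.isspace c = false := by
  unfold PySem.Chars.rstrip at h
  rw [List.getLast?_reverse] at h
  have := List.head?_dropWhile_not PySem.Chars.isspace cs.reverse
  rw [h] at this; simpa using this

lemma rstrip_prefix (cs : List Char) : PySem.Chars.rstrip cs <+: cs := by
  unfold PySem.Chars.rstrip
  have h := List.dropWhile_suffix (l := cs.reverse) PySem.Chars.isspace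
  have := h.reverse
  simpa using this

lemma head?_of_prefix {cs ds : List Char} (h : cs <+: ds) (hne : cs ≠ []) :
    ds.head? = cs.head? := by
  obtain ⟨t, rfl⟩ := h
  cases cs with
  | nil => exact absurd rfl hne
  | cons a u => simp

lemma head?_strip_not_ws (cs : List Char) (c : Char)
    (h : (PySem.Chars.strip cs).head? = some c) : PySem.Chars.isspace c = false := by
  unfold PySem.Chars.strip at h
  have hne : PySem.Chars.rstrip (PySem.Chars.lstrip cs) ≠ [] := by
    intro hn; rw [hn] at h; simp at h
  have := head?_of_prefix (rstrip_prefix (PySem.Chars.lstrip cs)) hne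
  exact head?_lstrip_not_ws cs c (by rw [this, h])

lemma getLast?_strip_not_ws (cs : List Char) (c : Char)
    (h : (PySem.Chars.strip cs).getLast? = some c) : PySem.Chars.isspace c = false :=
  getLast?_rstrip_not_ws _ c h

lemma strip_eq_self (cs : List Char)
    (h1 : ∀ c ∈ cs.head?, PySem.Chars.isspace c = false)
    (h2 : ∀ c ∈ cs.getLast?, PySem.Chars.isspace c = false) :
    PySem.Chars.strip cs = cs := by
  have hl : PySem.Chars.lstrip cs = cs := by
    unfold PySem.Chars.lstrip
    cases cs with
    | nil => rfl
    | cons a t => rw [List.dropWhile_cons_of_neg]; simpa using h1 a (by simp)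
  unfold PySem.Chars.strip
  rw [hl]
  unfold PySem.Chars.rstrip
  rcases hrev : cs.reverse with _ | ⟨a, t⟩
  · have : cs = [] := by simpa using congrArg List.reverse hrev
    simp [this]
  · have ha : cs.getLast? = some a := by rw [← List.head?_reverse, hrev]; rfl
    rw [List.dropWhile_cons_of_neg (by simpa using h2 a (by rw [ha]; rfl))]
    rw [← hrev, List.reverse_reverse]

lemma strip_idem (cs : List Char) :
    PySem.Chars.strip (PySem.Chars.strip cs) = PySem.Chars.strip cs :=
  strip_eq_self _ (fun c hc => head?_strip_not_ws cs c hc)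
    (fun c hc => getLast?_strip_not_ws cs c hc)

lemma strip_append_ws (w : List Char) (c : Char) (h : PySem.Chars.isspace c = true) :
    PySem.Chars.strip (w ++ [c]) = PySem.Chars.strip w := by
  have hr : ∀ x : List Char, PySem.Chars.rstrip (x ++ [c]) = PySem.Chars.rstrip x := by
    intro x
    unfold PySem.Chars.rstrip
    rw [List.reverse_append, List.reverse_singleton, List.singleton_append,
      List.dropWhile_cons_of_pos (by simpa using h)]
  unfold PySem.Chars.strip PySem.Chars.lstrip
  rw [List.dropWhile_append]
  split_ifs with he
  · rw [List.isEmpty_iff] at he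
    rw [List.dropWhile_cons_of_pos (by simpa using h), he]
    simp
  · exact hr _

lemma pyGet?_neg_one {α : Type} (xs : List α) : PySem.List.pyGet? xs (-1) = xs.getLast? := by
  cases xs with
  | nil => rfl
  | cons a t => simp [PySem.List.pyGet?, PySem.List.pyIdx?, List.getLast?_eq_getElem?]

lemma join_cons_ne_nil (sep q : List Char) (t : List (List Char)) (hq : q ≠ []) :
    PySem.Chars.join sep (q :: t) ≠ [] := by
  cases t with
  | nil => simpa [PySem.Chars.join_singleton] using hq
  | cons b t' => simp [PySem.Chars.join_cons_cons, hq]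

lemma head?_join (sep : List Char) (a : List Char) (t : List (List Char)) (ha : a ≠ []) :
    (PySem.Chars.join sep (a :: t)).head? = a.head? := by
  obtain ⟨c, a', rfl⟩ := List.exists_cons_of_ne_nil ha
  cases t with
  | nil => rw [PySem.Chars.join_singleton]
  | cons b t' => rw [PySem.Chars.join_cons_cons]; simp

lemma getLast?_join (sep : List Char) (qs : List (List Char)) (a : List Char) (ha : a ≠ []) :
    (PySem.Chars.join sep (qs ++ [a])).getLast? = a.getLast? := by
  induction qs with
  | nil => rw [List.nil_append, PySem.Chars.join_singleton]
  | cons x t ih =>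
    rw [List.cons_append, show t ++ [a] = (t ++ [a]) from rfl]
    obtain ⟨b, r, hbr⟩ : ∃ b r, t ++ [a] = b :: r := by
      cases t with
      | nil => exact ⟨a, [], rfl⟩
      | cons y t' => exact ⟨y, t' ++ [a], rfl⟩
    rw [hbr, PySem.Chars.join_cons_cons, ← hbr]
    rw [List.getLast?_append, ih]
    rcases hla : a.getLast? with _ | c
    · exact absurd (List.getLast?_eq_none_iff.mp hla) ha
    · simp

lemma join_append (sep : List Char) (xs ys : List (List Char)) (hx : xs ≠ []) (hy : ys ≠ []) :
    PySem.Chars.join sep (xs ++ ys) =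
      PySem.Chars.join sep xs ++ sep ++ PySem.Chars.join sep ys := by
  induction xs with
  | nil => exact absurd rfl hx
  | cons x t ih =>
    cases t with
    | nil =>
      obtain ⟨y, t', rfl⟩ := List.exists_cons_of_ne_nil hy
      rw [List.singleton_append, PySem.Chars.join_cons_cons, PySem.Chars.join_singleton]
    | cons z t' =>
      rw [List.cons_append, show (z :: t') ++ ys = z :: (t' ++ ys) from rfl,
        PySem.Chars.join_cons_cons, ← show (z :: t') ++ ys = z :: (t' ++ ys) from rfl,
        ih (by simp), PySem.Chars.join_cons_cons]
      simp

lemma glueC_cons_ne_nil (q : List (List Char)) (t : List (List (List Char))) (hq : q ≠ []) :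
    glueC (q :: t) ≠ [] := by
  cases t with
  | nil => simpa [glueC] using hq
  | cons r t' => simp [glueC, hq]

-- pulling the blank separators of A's flat list out into "\n\n" paragraph separators
lemma join_glueC (qs : List (List (List Char))) (h : ∀ q ∈ qs, q ≠ []) :
    PySem.Chars.join ['\n'] (glueC qs) =
      PySem.Chars.join ['\n', '\n'] (qs.map (PySem.Chars.join ['\n'])) := by
  induction qs with
  | nil => simp [glueC, PySem.Chars.join_nil]
  | cons q t ih =>
    cases t with
    | nil => simp [glueC, PySem.Chars.join_singleton]
    | cons r t' =>
      have hq : q ≠ [] := h q (by simp)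
      have hg : glueC (r :: t') ≠ [] := glueC_cons_ne_nil r t' (h r (by simp))
      obtain ⟨b, rest, hbr⟩ := List.exists_cons_of_ne_nil hg
      rw [show glueC (q :: r :: t') = q ++ [] :: glueC (r :: t') from rfl,
        show q ++ [] :: glueC (r :: t') = q ++ ([[]] ++ glueC (r :: t')) from by simp,
        join_append ['\n'] q ([[]] ++ glueC (r :: t')) hq (by simp),
        show ([[]] ++ glueC (r :: t')) = [] :: glueC (r :: t') from rfl, hbr,
        PySem.Chars.join_cons_cons, ← hbr, ih (fun q hq' => h q (by simp [hq']))]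
      rw [show (List.map (PySem.Chars.join ['\n']) (q :: r :: t')) =
            PySem.Chars.join ['\n'] q :: PySem.Chars.join ['\n'] r ::
              List.map (PySem.Chars.join ['\n']) t' from rfl,
        PySem.Chars.join_cons_cons]
      simp

def CleanC (cs : List Char) : Prop := PySem.Chars.strip cs = cs ∧ cs ≠ []

lemma strip_join2 (qs : List (List (List Char)))
    (h : ∀ q ∈ qs, q ≠ [] ∧ ∀ s ∈ q, CleanC s) :
    PySem.Chars.strip (PySem.Chars.join ['\n', '\n'] (qs.map (PySem.Chars.join ['\n']))) =
      PySem.Chars.join ['\n', '\n'] (qs.map (PySem.Chars.join ['\n'])) := by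
  cases qs with
  | nil => simp [PySem.Chars.join_nil]; rfl
  | cons q t =>
    apply strip_eq_self
    · intro c hc
      rw [Option.mem_def] at hc
      obtain ⟨hqne, hqcl⟩ := h q (by simp)
      obtain ⟨s, q', rfl⟩ := List.exists_cons_of_ne_nil hqne
      have hs := hqcl s (by simp)
      rw [List.map_cons, head?_join _ _ _ (join_cons_ne_nil _ _ _ hs.2),
        head?_join _ _ _ hs.2] at hc
      exact head?_strip_not_ws s c (by rw [hs.1]; exact hc)
    · intro c hc
      rw [Option.mem_def] at hc
      rcases List.eq_nil_or_concat' (q :: t) with h0 | ⟨init, b, hinit⟩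
      · simp at h0
      · obtain ⟨hbne, hbcl⟩ := h b (by rw [hinit]; simp)
        rcases List.eq_nil_or_concat' b with rfl | ⟨binit, slast, rfl⟩
        · exact absurd rfl hbne
        have hsl := hbcl slast (by simp)
        have hjb : (PySem.Chars.join ['\n'] (binit ++ [slast])).getLast? = slast.getLast? :=
          getLast?_join _ _ _ hsl.2
        have hjbne : PySem.Chars.join ['\n'] (binit ++ [slast]) ≠ [] := by
          intro h0
          have : slast.getLast? = none := by rw [← hjb, h0]; rfl
          exact absurd (List.getLast?_eq_none_iff.mp this) hsl.2
        rw [hinit, List.map_append, List.map_singleton,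
          getLast?_join _ _ _ hjbne, hjb] at hc
        exact getLast?_strip_not_ws slast c (by rw [hsl.1]; exact hc)

lemma cleanS_ne_empty {s : String} (h : CleanS s) : s ≠ "" := by
  intro h0; exact h.2 ((str_eq_empty_iff s).mp h0)

lemma reprS_getLast? (done : List (List String)) (cur : List String) (hc : cur ≠ []) :
    (reprS done cur).getLast? = cur.getLast? := by
  unfold reprS
  obtain ⟨x, t, rfl⟩ := List.exists_cons_of_ne_nil hc
  simp only [ne_eq, reduceCtorEq, not_false_eq_true, if_pos, glueS_append_singleton]
  by_cases hd : done = []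
  · simp [hd]
  · rw [if_neg hd, List.getLast?_append, List.getLast?_cons_cons]
    obtain ⟨a, ha⟩ := Option.isSome_iff_exists.mp (List.getLast?_isSome.mpr
      (by simp : (x :: t) ≠ []))
    rw [ha]; rfl

lemma fold_invariant (lines : List String) :
    ∀ (done : List (List String)) (cur : List String), GoodS done cur →
      lines.foldl text_to_md_stepA (reprS done cur) =
        reprS (lines.foldl text_to_md_stepB (done, cur)).1 (lines.foldl text_to_md_stepB (done, cur)).2
      ∧ GoodS (lines.foldl text_to_md_stepB (done, cur)).1 (lines.foldl text_to_md_stepB (done, cur)).2 := by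
  induction lines with
  | nil => intro done cur hg; exact ⟨rfl, hg⟩
  | cons line rest ih =>
    intro done cur hg
    rw [List.foldl_cons, List.foldl_cons]
    by_cases hs : PySem.Str.strip line = ""
    · by_cases hc : cur = []
      · have hB : text_to_md_stepB (done, cur) line = (done, cur) := by
          unfold text_to_md_stepB; simp [hs, hc]
        have hA : text_to_md_stepA (reprS done cur) line = reprS done cur := by
          unfold text_to_md_stepA
          by_cases hd : done = []
          · simp [hs, reprS, hc, hd]
          · simp [hs, reprS, hc, hd, pyGet?_neg_one, List.getLast?_concat]
        rw [hA, hB]; exact ih done cur hg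
      · have hB : text_to_md_stepB (done, cur) line = (done ++ [cur], []) := by
          unfold text_to_md_stepB; simp [hs, hc]
        obtain ⟨a, ha⟩ := Option.isSome_iff_exists.mp (List.getLast?_isSome.mpr hc)
        have hamem : a ∈ cur := List.mem_of_getLast? ha
        have hane : a ≠ "" := cleanS_ne_empty (hg.2 a hamem)
        have hrne : reprS done cur ≠ [] := by
          unfold reprS
          rw [if_pos hc, glueS_append_singleton]
          by_cases hd : done = [] <;> simp [hd, hc]
        have hA : text_to_md_stepA (reprS done cur) line = reprS (done ++ [cur]) [] := by
          unfold text_to_md_stepA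
          rw [if_neg (by simpa using hs), if_pos ⟨hrne, by
            rw [pyGet?_neg_one, reprS_getLast? done cur hc, ha]
            simpa using hane⟩]
          unfold reprS
          simp [hc]
        rw [hA, hB]
        refine ih (done ++ [cur]) [] ⟨?_, by simp⟩
        intro p hp
        rcases List.mem_append.mp hp with h1 | h1
        · exact hg.1 p h1
        · rw [List.mem_singleton.mp h1]; exact ⟨hc, hg.2⟩
    · have hB : text_to_md_stepB (done, cur) line = (done, cur ++ [PySem.Str.strip line]) := by
        unfold text_to_md_stepB; simp [hs]
      have hA : text_to_md_stepA (reprS done cur) line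
          = reprS done cur ++ [PySem.Str.strip line] := by
        unfold text_to_md_stepA; simp [hs]
      have hclean : CleanS (PySem.Str.strip line) := by
        constructor
        · rw [PySem.Str.toList_strip, strip_idem]
        · rw [PySem.Str.toList_strip]
          intro h0
          exact hs ((str_eq_empty_iff _).mpr (by rw [PySem.Str.toList_strip, h0]))
      rw [hA, hB, reprS_cur_append]
      refine ih done (cur ++ [PySem.Str.strip line]) ⟨hg.1, ?_⟩
      intro x hx
      rcases List.mem_append.mp hx with h1 | h1
      · exact hg.2 x h1
      · rw [List.mem_singleton.mp h1]; exact hclean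

lemma body_eq (done : List (List String)) (cur : List String) (hg : GoodS done cur) :
    PySem.Str.strip (PySem.Str.join "\n" (reprS done cur)) =
      PySem.Str.join "\n\n"
        ((if cur ≠ [] then done ++ [cur] else done).map (fun p => PySem.Str.join "\n" p)) := by
  have hnl : ("\n" : String).toList = ['\n'] := rfl
  have hnl2 : ("\n\n" : String).toList = ['\n', '\n'] := rfl
  unfold PySem.Str.strip PySem.Str.join
  apply congrArg String.ofList
  rw [String.toList_ofList, hnl, hnl2]
  set paras := (if cur ≠ [] then done ++ [cur] else done) with hparas
  have hmm : List.map String.toList (paras.map (fun p => String.ofList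
      (PySem.Chars.join ['\n'] (List.map String.toList p)))) =
      (paras.map (fun p => p.map String.toList)).map (PySem.Chars.join ['\n']) := by
    rw [List.map_map, List.map_map]
    apply List.map_congr_left
    intro p _
    simp [String.toList_ofList, hnl]
  rw [hmm]
  set qs := paras.map (fun p => p.map String.toList) with hqs
  have hq : ∀ q ∈ qs, q ≠ [] ∧ ∀ s ∈ q, CleanC s := by
    intro q hqmem
    rw [hqs] at hqmem
    obtain ⟨p, hp, rfl⟩ := List.mem_map.mp hqmem
    have hpgood : p ≠ [] ∧ ∀ s ∈ p, CleanS s := by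
      rw [hparas] at hp
      by_cases hc : cur = []
      · rw [if_neg (by simpa using hc)] at hp
        exact hg.1 p hp
      · rw [if_pos hc] at hp
        rcases List.mem_append.mp hp with h1 | h1
        · exact hg.1 p h1
        · rw [List.mem_singleton.mp h1]; exact ⟨hc, hg.2⟩
    refine ⟨by simpa using hpgood.1, ?_⟩
    intro s hsmem
    obtain ⟨x, hx, rfl⟩ := List.mem_map.mp hsmem
    exact hpgood.2 x hx
  by_cases hc : cur = []
  · subst hc
    by_cases hd : done = []
    · subst hd
      simp only [reprS, ne_eq, not_true_eq_false, if_neg, reduceIte] at *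
      rw [hparas] at hqs
      simp only [reduceIte, List.map_nil] at hqs
      rw [hqs]
      simp [PySem.Chars.join_nil]
      rfl
    · have hrepr : reprS done [] = glueS done ++ [""] := by simp [reprS, hd]
      have hparas' : paras = done := by rw [hparas]; simp
      rw [hrepr, List.map_append, map_toList_glueS, List.map_singleton,
        show ("" : String).toList = [] from rfl]
      obtain ⟨p, d', rfl⟩ := List.exists_cons_of_ne_nil hd
      have hgc : glueC (List.map (fun p => p.map String.toList) (p :: d')) ≠ [] := by
        rw [List.map_cons]
        exact glueC_cons_ne_nil _ _ (by simpa using (hg.1 p (by simp)).1)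
      rw [join_append ['\n'] _ [[]] hgc (by simp), PySem.Chars.join_singleton,
        List.append_nil, strip_append_ws _ '\n' (by decide)]
      rw [hparas'] at hqs
      rw [join_glueC _ (fun q hqm => (hq q (by rw [hqs]; exact hqm)).1), ← hqs]
      exact strip_join2 qs hq
  · have hrepr : reprS done cur = glueS (done ++ [cur]) := by simp [reprS, hc]
    have hparas' : paras = done ++ [cur] := by rw [hparas]; simp [hc]
    rw [hrepr, map_toList_glueS, ← hparas']
    rw [join_glueC _ (fun q hqm => (hq q (by rw [hqs]; exact hqm)).1), ← hqs]
    exact strip_join2 qs hq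

theorem text_to_md_py_spec : Claim_equal_text_to_md_py := by
  unfold Claim_equal_text_to_md_py
  intro text page_num _
  simp only [Spec_text_to_md_py, text_to_md_py, text_to_md_py_alt]
  obtain ⟨heq, hgood⟩ := fold_invariant (PySem.Str.splitlines text) [] []
    ⟨by simp, by simp⟩
  rw [show reprS [] [] = [] from by simp [reprS]] at heq
  rw [heq]
  exact congrArg _ (body_eq _ _ hgood)
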